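-- pv_equiv track=rewrite | github.com/dyeap-zz/CS_Practice | Google_leetcode.py | min_char_count
-- ===== SOURCE A (Python) =====
-- def min_char_count(string):
--     my_dict = {}
--     for char in string:
--         if char in my_dict:
--             my_dict[char] += 1
--         else:
--             my_dict[char] = 1
--     min_char_occ = list(my_dict.items())[0]
--     for tup_char_occ in my_dict.items():
--         if (min_char_occ[0] > tup_char_occ[0]):
--             min_char_occ = tup_char_occ
--     return min_char_occ
-- ===== SOURCE B (Python) =====
-- def min_char_count(string):
--     s = sorted(string)
--     c = s[0]
--     return (c, s.count(c))
-- ===== Notes on version B (the rewrite author's own statement) =====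
-- stated objective: simpler
-- what changed: B sorts the characters and takes the front element with its count of the equal prefix, instead of building an insertion-ordered frequency dict and linearly scanning its items for the minimal key.
import Mathlib
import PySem

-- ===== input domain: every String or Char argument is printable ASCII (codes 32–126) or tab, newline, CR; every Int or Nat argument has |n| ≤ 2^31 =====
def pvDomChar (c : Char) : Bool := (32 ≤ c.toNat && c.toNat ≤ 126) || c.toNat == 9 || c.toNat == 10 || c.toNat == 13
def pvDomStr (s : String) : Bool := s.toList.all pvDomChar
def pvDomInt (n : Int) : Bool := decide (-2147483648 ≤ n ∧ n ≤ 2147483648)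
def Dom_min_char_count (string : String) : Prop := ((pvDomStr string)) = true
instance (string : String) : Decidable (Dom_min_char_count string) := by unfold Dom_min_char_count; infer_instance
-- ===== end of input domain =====

-- B sorts the characters and returns the front element with its count, instead of A's
-- frequency dict scanned for the minimal key; same result, different algorithm.

-- ===== PORT A =====
def min_char_count (string : String) : String × Int :=
  let d := string.toList.foldl
    (fun d c => if d.contains c then d.insert c (d.getD c 0 + 1) else d.insert c 1)
    PySem.Dict.empty
  match PySem.List.pyGet? d.items 0 with
  | none => ("", 0)   -- list(my_dict.items())[0] raises IndexError on the empty string; excluded by Pre_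
  | some first =>
      let m := d.items.foldl (fun m t => if m.1 > t.1 then t else m) first
      (String.singleton m.1, m.2)

-- ===== PORT B =====
def min_char_count_alt (string : String) : String × Int :=
  let s := PySem.List.sorted string.toList (fun x => x) false
  match PySem.List.pyGet? s 0 with
  | none => ("", 0)   -- s[0] raises IndexError on the empty string; excluded by Pre_
  | some c => (String.singleton c, (s.count c : Int))

-- ===== PRECONDITION & SPEC =====
-- A raises IndexError on the empty string (list(my_dict.items())[0]); excluded.
def Pre_min_char_count (string : String) : Prop := string ≠ ""
instance (string : String) : Decidable (Pre_min_char_count string) := by unfold Pre_min_char_count; infer_instance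
def pvWitness_min_char_count : String := "banana"

def Spec_min_char_count (string : String) (out : String × Int) : Prop := out = min_char_count_alt string
instance (string : String) (out : String × Int) : Decidable (Spec_min_char_count string out) := by unfold Spec_min_char_count; infer_instance

-- ===== CLAIM (what is proved, stated in full; the proofs are below) =====
def Claim_equal_min_char_count : Prop := ∀ (string : String), Dom_min_char_count string → Pre_min_char_count string → Spec_min_char_count string (min_char_count string)

-- ===== LEMMAS AND PROOFS =====

lemma pyGet0 {α : Type} (x : α) (xs : List α) : PySem.List.pyGet? (x :: xs) 0 = some x := by
  simp [PySem.List.pyGet?, PySem.List.pyIdx?]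

-- the pair-valued min fold over a key-faithful map is the min fold on the keys
lemma foldl_pair_min (f : Char → Char × Int) (hf : ∀ k, (f k).1 = k) :
    ∀ (l : List Char) (a : Char),
      List.foldl (fun m t => if m.1 > t.1 then t else m) (f a) (l.map f)
        = f (List.foldl (fun x y => if x > y then y else x) a l) := by
  intro l
  induction l with
  | nil => intro a; rfl
  | cons b t ih =>
      intro a
      simp only [List.map_cons, List.foldl_cons, hf]
      by_cases h : a > b <;> simp [h, ih]

lemma foldl_gt_min (l : List Char) (a : Char) :
    List.foldl (fun x y => if x > y then y else x) a l = l.foldl min a := by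
  induction l generalizing a with
  | nil => rfl
  | cons b t ih =>
      simp only [List.foldl_cons, ih]
      congr 1
      by_cases h : a > b
      · simp [h, le_of_lt]
      · simp [h, not_lt.mp h]

theorem min_char_count_spec' (s : String) (hpre : s ≠ "") :
    min_char_count s = min_char_count_alt s := by
  have hne : s.toList ≠ [] := by simpa using hpre
  -- A's counting loop builds Counter(s)
  have hstep : (fun (d : PySem.Dict Char Int) c =>
      if d.contains c then d.insert c (d.getD c 0 + 1) else d.insert c 1)
      = fun d x => d.insert x (d.getD x 0 + 1) := by
    funext d c
    by_cases h : d.contains c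
    · simp [h]
    · have h' : d.contains c = false := by simpa using h
      rw [if_neg (by simp [h']), PySem.Dict.getD_of_not_contains d 0 h']
      norm_num
  have hd : s.toList.foldl
      (fun d c => if d.contains c then d.insert c (d.getD c 0 + 1) else d.insert c 1)
      PySem.Dict.empty = PySem.Dict.counter s.toList := by
    rw [hstep, PySem.Dict.foldl_insert_getD_add_one_eq_counter s.toList]
  -- B's sorted list is nonempty, with minimal head c0
  obtain ⟨c0, st, hs⟩ : ∃ c0 st, PySem.List.sorted s.toList (fun x => x) false = c0 :: st := by
    cases h : PySem.List.sorted s.toList (fun x => x) false with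
    | nil => exact absurd ((PySem.List.sorted_eq_nil_iff _ _ _).mp h) hne
    | cons a t => exact ⟨a, t, rfl⟩
  have hc0mem : c0 ∈ s.toList := by
    have hm : c0 ∈ PySem.List.sorted s.toList (fun x => x) false := by rw [hs]; simp
    exact (PySem.List.mem_sorted _ _ _ _).mp hm
  have hc0min : ∀ y ∈ s.toList, c0 ≤ y := by
    intro y hy
    simpa using PySem.List.key_head_sorted_le s.toList (fun x => x) hs y hy
  -- the distinct keys of the counter
  obtain ⟨k0, rest, hk⟩ : ∃ k0 rest, PySem.Set.ofList s.toList = k0 :: rest := by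
    cases h : PySem.Set.ofList s.toList with
    | nil =>
        obtain ⟨c, t, h2⟩ := List.exists_cons_of_ne_nil hne
        have hm : c ∈ PySem.Set.ofList s.toList :=
          (PySem.Set.mem_ofList _ _).mpr (by simp [h2])
        rw [h] at hm
        simp at hm
    | cons a t => exact ⟨a, t, rfl⟩
  -- the minimal key μ found by A's scan equals c0
  have hmin? : PySem.List.min? (k0 :: rest) (fun y => y) = some (rest.foldl min k0) :=
    PySem.List.min?_id_cons k0 rest
  have hμmem : rest.foldl min k0 ∈ s.toList := by
    have := PySem.List.min?_mem hmin?
    rw [← hk] at this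
    exact (PySem.Set.mem_ofList _ _).mp this
  have hμc0 : rest.foldl min k0 = c0 := by
    apply le_antisymm
    · have hc0k : c0 ∈ k0 :: rest := by
        rw [← hk]; exact (PySem.Set.mem_ofList _ _).mpr hc0mem
      simpa using PySem.List.min?_isMin hmin? c0 hc0k
    · exact hc0min _ hμmem
  -- evaluate both ports
  have hitems : (PySem.Dict.counter s.toList).items
      = (k0 :: rest).map (fun k => (k, (s.toList.count k : Int))) := by
    rw [PySem.Dict.items_counter, hk]
  simp only [min_char_count, min_char_count_alt, hd, hitems, hs, List.map_cons, pyGet0]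
  have hfold := foldl_pair_min (fun k => (k, (s.toList.count k : Int))) (fun _ => rfl)
      (k0 :: rest) k0
  simp only [List.map_cons] at hfold
  rw [hfold]
  have hfold2 : List.foldl (fun x y => if x > y then y else x) k0 (k0 :: rest)
      = rest.foldl min k0 := by
    simp only [List.foldl_cons, gt_iff_lt, if_neg (lt_irrefl k0)]
    exact foldl_gt_min rest k0
  rw [hfold2, hμc0]
  have hcnt : (c0 :: st).count c0 = s.toList.count c0 := by
    have hp := PySem.List.sorted_perm s.toList (fun x => x) false
    rw [hs] at hp
    exact hp.count_eq c0
  rw [← hcnt]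

-- ===== VERDICT (by name: the statement is the Claim_ definition above) =====
theorem min_char_count_spec : Claim_equal_min_char_count := by
  intro s _ hpre
  exact min_char_count_spec' s hpre
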